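-- pv_equiv track=rewrite | github.com/agenta2z/RichPythonUtils | src/rich_python_utils/common_objects/variable_manager/file_based.py | _generate_underscore_splits
-- ===== SOURCE A (Python) =====
-- from typing import Callable, Dict, Iterator, List, Mapping, Optional, Set, Tuple
--
-- def _generate_underscore_splits(name: str) -> List[str]:
--     """Generate all possible path splits for a variable name with underscores.
--
--     Args:
--         name: Variable name (e.g., "notes_mindset" or "my_app_settings")
--
--     Returns:
--         List of possible paths (e.g., ["notes/mindset", "notes_mindset"])
--     """
--     if "_" not in name:
--         return [name]  # Flat file only
--
--     splits = []
--     parts = name.split("_")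
--
--     # Generate all possible split points
--     # For "a_b_c", generate: "a/b_c", "a_b/c", "a_b_c"
--     for i in range(1, len(parts)):
--         folder = "_".join(parts[:i])
--         file_name = "_".join(parts[i:])
--         splits.append(f"{folder}/{file_name}")
--
--     # Also try as flat file
--     splits.append(name)
--
--     return splits
-- ===== SOURCE B (Python) =====
-- from typing import List
--
--
-- def _generate_underscore_splits(name: str) -> List[str]:
--     """Single pass over the string: every '_' position is a split point."""
--     splits = [name[:i] + "/" + name[i + 1:] for i, ch in enumerate(name) if ch == "_"]
--     splits.append(name)
--     return splits
-- ===== Notes on version B (the rewrite author's own statement) =====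
-- stated objective: simpler
-- what changed: Replaces the split-into-parts-then-rejoin loop (split('_'), '_'.join of prefix and suffix part lists per split point) with a single comprehension over enumerate(name) that slices the string at each underscore position, and drops the redundant '_' not in name guard.
import Mathlib
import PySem

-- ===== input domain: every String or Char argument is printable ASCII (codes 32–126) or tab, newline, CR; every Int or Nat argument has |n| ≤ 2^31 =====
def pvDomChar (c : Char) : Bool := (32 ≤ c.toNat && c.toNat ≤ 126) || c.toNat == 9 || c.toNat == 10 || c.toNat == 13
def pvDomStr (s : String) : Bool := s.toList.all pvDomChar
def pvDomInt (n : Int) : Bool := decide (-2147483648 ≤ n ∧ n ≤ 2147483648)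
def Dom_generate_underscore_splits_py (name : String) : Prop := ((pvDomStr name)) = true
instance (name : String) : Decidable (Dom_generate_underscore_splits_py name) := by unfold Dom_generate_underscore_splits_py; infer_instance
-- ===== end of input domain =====

-- B replaces A's split('_')/'_'.join-of-part-lists loop by one scan over enumerate(name)
-- that slices the string at each underscore position (objective: simpler).

-- ===== PORT A =====
def generate_underscore_splits_py (name : String) : List String :=
  if PySem.Str.isIn "_" name = false then
    [name]
  else
    let parts := PySem.Chars.splitOn name.toList ['_']
    let splits := (PySem.List.pyRange 1 (parts.length : Int) 1).foldl
      (fun acc i =>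
        let folder := PySem.Chars.join ['_'] (PySem.List.slice parts none (some i))
        let file_name := PySem.Chars.join ['_'] (PySem.List.slice parts (some i) none)
        acc ++ [String.ofList (folder ++ '/' :: file_name)]) []
    splits ++ [name]

-- ===== PORT B =====
def generate_underscore_splits_py_alt (name : String) : List String :=
  (((PySem.List.enumerate name.toList).filter (fun ic => ic.2 == '_')).map
    (fun ic => String.ofList (PySem.List.slice name.toList none (some ic.1) ++
      '/' :: PySem.List.slice name.toList (some (ic.1 + 1)) none)))
  ++ [name]

-- ===== PRECONDITION & SPEC =====
def Spec_generate_underscore_splits_py (name : String) (out : List String) : Prop := out = generate_underscore_splits_py_alt name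
instance (name : String) (out : List String) : Decidable (Spec_generate_underscore_splits_py name out) := by unfold Spec_generate_underscore_splits_py; infer_instance

-- ===== CLAIM (what is proved, stated in full; the proofs are below) =====
def Claim_equal_generate_underscore_splits_py : Prop := ∀ (name : String), Dom_generate_underscore_splits_py name → Spec_generate_underscore_splits_py name (generate_underscore_splits_py name)

-- ===== LEMMAS AND PROOFS =====

/-- `name.split('_')` as a plain structural recursion on the characters. -/
def splitChar : List Char → List (List Char)
  | [] => [[]]
  | c :: t => if c = '_' then [] :: splitChar t else (splitChar t).modifyHead (c :: ·)

/-- The char-list splits A produces, as a structural recursion on the parts list. -/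
def aParts : List (List Char) → List (List Char)
  | [] => []
  | [_] => []
  | p :: q :: rest =>
      (p ++ '/' :: PySem.Chars.join ['_'] (q :: rest)) ::
        (aParts (q :: rest)).map (fun t => p ++ '_' :: t)

theorem splitChar_ne_nil (cs : List Char) : splitChar cs ≠ [] := by
  cases cs with
  | nil => simp [splitChar]
  | cons c t =>
    simp only [splitChar]
    split_ifs
    · simp
    · cases h : splitChar t with
      | nil => exact absurd h (splitChar_ne_nil t)
      | cons a l => simp

theorem splitOn_go_eq (fuel : Nat) :
    ∀ (l cur : List Char) (acc : List (List Char)), l.length < fuel →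
      PySem.Chars.splitOn.go ['_'] fuel l cur acc =
        acc.reverse ++ (splitChar l).modifyHead (fun x => cur.reverse ++ x) := by
  induction fuel with
  | zero => intro l cur acc h; omega
  | succ fuel ih =>
    intro l cur acc h
    cases l with
    | nil => simp [PySem.Chars.splitOn.go, splitChar]
    | cons c rest =>
      by_cases hc : c = '_'
      · subst hc
        rw [show PySem.Chars.splitOn.go ['_'] (fuel+1) ('_' :: rest) cur acc =
            PySem.Chars.splitOn.go ['_'] fuel (List.drop 1 ('_' :: rest)) [] (cur.reverse :: acc) from by
          simp [PySem.Chars.splitOn.go, List.isPrefixOf]]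
        rw [ih _ _ _ (by simpa using Nat.lt_of_succ_lt_succ h)]
        cases hs : splitChar rest with
        | nil => exact absurd hs (splitChar_ne_nil rest)
        | cons a t => simp [splitChar, hs]
      · rw [show PySem.Chars.splitOn.go ['_'] (fuel+1) (c :: rest) cur acc =
            PySem.Chars.splitOn.go ['_'] fuel rest (c :: cur) acc from by
          simp [PySem.Chars.splitOn.go, List.isPrefixOf, Ne.symm hc]]
        rw [ih _ _ _ (by simpa using Nat.lt_of_succ_lt_succ h)]
        cases hs : splitChar rest with
        | nil => exact absurd hs (splitChar_ne_nil rest)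
        | cons a t => simp [splitChar, hs, hc]

theorem splitOn_eq_splitChar (cs : List Char) :
    PySem.Chars.splitOn cs ['_'] = splitChar cs := by
  have h := splitOn_go_eq (cs.length + 1) cs [] [] (by omega)
  rw [PySem.Chars.splitOn, h]
  cases hs : splitChar cs with
  | nil => exact absurd hs (splitChar_ne_nil cs)
  | cons a t => simp

theorem join_cons_of_ne_nil (p : List Char) {L : List (List Char)} (h : L ≠ []) :
    PySem.Chars.join ['_'] (p :: L) = p ++ '_' :: PySem.Chars.join ['_'] L := by
  cases L with
  | nil => exact absurd rfl h
  | cons q rest => rw [PySem.Chars.join_cons_cons]; simp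

theorem join_splitChar (cs : List Char) :
    PySem.Chars.join ['_'] (splitChar cs) = cs := by
  induction cs with
  | nil => simp [splitChar, PySem.Chars.join_singleton]
  | cons c t ih =>
    by_cases hc : c = '_'
    · subst hc
      rw [show splitChar ('_' :: t) = [] :: splitChar t from by simp [splitChar]]
      rw [join_cons_of_ne_nil [] (splitChar_ne_nil t), ih]; rfl
    · rw [show splitChar (c :: t) = (splitChar t).modifyHead (c :: ·) from by simp [splitChar, hc]]
      cases hs : splitChar t with
      | nil => exact absurd hs (splitChar_ne_nil t)
      | cons p rest =>
        cases rest with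
        | nil =>
          simp only [List.modifyHead, PySem.Chars.join_singleton]
          rw [hs] at ih
          simp [PySem.Chars.join_singleton] at ih
          simp [ih]
        | cons q r2 =>
          simp only [List.modifyHead]
          rw [PySem.Chars.join_cons_cons]
          rw [hs] at ih
          rw [PySem.Chars.join_cons_cons] at ih
          simp [ih]

theorem aParts_modifyHead (c : Char) (P : List (List Char)) (h : P ≠ []) :
    aParts (P.modifyHead (c :: ·)) = (aParts P).map (c :: ·) := by
  cases P with
  | nil => exact absurd rfl h
  | cons p rest =>
    cases rest with
    | nil => simp [aParts]
    | cons q r2 =>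
      simp only [List.modifyHead, aParts, List.cons_append, List.map_cons, List.map_map]
      congr 1

theorem pyRange_succ_map (a b : Int) :
    PySem.List.pyRange (a + 1) (b + 1) 1 = (PySem.List.pyRange a b 1).map (· + 1) := by
  simp only [PySem.List.pyRange]
  norm_num
  rcases lt_or_ge a b with h | h
  · simp only [if_pos h]
    intro k _
    ring
  · simp [if_neg (show ¬ a < b by omega)]

theorem aRange_eq (parts : List (List Char)) (h : parts ≠ []) :
    (PySem.List.pyRange 1 (parts.length : Int) 1).map
      (fun i => PySem.Chars.join ['_'] (PySem.List.slice parts none (some i)) ++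
        '/' :: PySem.Chars.join ['_'] (PySem.List.slice parts (some i) none))
    = aParts parts := by
  induction parts with
  | nil => exact absurd rfl h
  | cons p rest ih =>
    cases rest with
    | nil => simp [PySem.List.pyRange, aParts]
    | cons q r2 =>
      have hlen : ((p :: q :: r2).length : Int) = ((q :: r2).length : Int) + 1 := by
        simp
      rw [hlen]
      have h1 : (1 : Int) < ((q :: r2).length : Int) + 1 := by
        have : (0 : Int) < ((q :: r2).length : Int) := by simp
        omega
      rw [PySem.List.pyRange_one_cons h1]
      rw [show (1 : Int) + 1 = (1 : Int) + 1 from rfl]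
      rw [pyRange_succ_map 1 ((q :: r2).length : Int)]
      simp only [List.map_cons, List.map_map]
      rw [show aParts (p :: q :: r2) =
        (p ++ '/' :: PySem.Chars.join ['_'] (q :: r2)) ::
          (aParts (q :: r2)).map (fun t => p ++ '_' :: t) from rfl]
      congr 1
      · rw [PySem.List.slice_to _ (by norm_num : (0:Int) ≤ 1),
            PySem.List.slice_from _ (by norm_num : (0:Int) ≤ 1)]
        simp [PySem.Chars.join_singleton]
      · rw [← ih (by simp)]
        rw [List.map_map]
        apply List.map_congr_left
        intro j hj
        have hj1 : 1 ≤ j ∧ j < ((q :: r2).length : Int) := by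
          have := (PySem.List.mem_pyRange_one).mp hj
          exact this
        have hj0 : (0:Int) ≤ j := by omega
        have hjt : (j + 1).toNat = j.toNat + 1 := by omega
        simp only [Function.comp]
        rw [PySem.List.slice_to _ (by omega : (0:Int) ≤ j + 1),
            PySem.List.slice_from _ (by omega : (0:Int) ≤ j + 1),
            PySem.List.slice_to _ hj0, PySem.List.slice_from _ hj0]
        rw [hjt]
        rw [List.take_succ_cons, List.drop_succ_cons]
        have htake : List.take j.toNat (q :: r2) ≠ [] := by
          have : 1 ≤ j.toNat := by omega
          cases hn : List.take j.toNat (q :: r2) with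
          | nil =>
            have := congrArg List.length hn
            simp at this
            omega
          | cons _ _ => simp
        rw [join_cons_of_ne_nil _ htake]
        simp

theorem enumerate_shift {α : Type} (xs : List α) (s : Int) :
    PySem.List.enumerate xs (s + 1) = (PySem.List.enumerate xs s).map (fun p => (p.1 + 1, p.2)) := by
  induction xs generalizing s with
  | nil => simp [PySem.List.enumerate]
  | cons x t ih => simp [PySem.List.enumerate, ih]

theorem bList_eq (cs : List Char) :
    ((PySem.List.enumerate cs).filter (fun ic => ic.2 == '_')).map
      (fun ic => PySem.List.slice cs none (some ic.1) ++
        '/' :: PySem.List.slice cs (some (ic.1 + 1)) none)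
    = aParts (splitChar cs) := by
  induction cs with
  | nil => simp [PySem.List.enumerate, splitChar, aParts]
  | cons c t ih =>
    rw [show PySem.List.enumerate (c :: t) = (0, c) :: PySem.List.enumerate t (0 + 1) from rfl]
    rw [show (0 : Int) + 1 = 0 + 1 from rfl, enumerate_shift t 0]
    rw [List.filter_cons]
    have hmaps :
        (((PySem.List.enumerate t 0).map (fun p => (p.1 + 1, p.2))).filter (fun ic => ic.2 == '_')).map
          (fun ic => PySem.List.slice (c :: t) none (some ic.1) ++
            '/' :: PySem.List.slice (c :: t) (some (ic.1 + 1)) none)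
        = (((PySem.List.enumerate t 0).filter (fun ic => ic.2 == '_')).map
            (fun ic => PySem.List.slice t none (some ic.1) ++
              '/' :: PySem.List.slice t (some (ic.1 + 1)) none)).map (c :: ·) := by
      rw [List.filter_map, List.map_map, List.map_map]
      apply List.map_congr_left
      intro p hp
      have hp' := List.mem_of_mem_filter hp
      obtain ⟨k, hk, hpk⟩ := (PySem.List.mem_enumerate_iff _ _ _).mp hp'
      subst hpk
      simp only [Function.comp]
      have h0 : ((0:Int) + k) = (k : Int) := by omega
      rw [PySem.List.slice_to _ (by omega : (0:Int) ≤ 0 + k + 1),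
          PySem.List.slice_from _ (by omega : (0:Int) ≤ 0 + k + 1 + 1),
          PySem.List.slice_to _ (by omega : (0:Int) ≤ 0 + k),
          PySem.List.slice_from _ (by omega : (0:Int) ≤ 0 + k + 1)]
      have h1 : ((0:Int) + k + 1).toNat = ((0:Int) + k).toNat + 1 := by omega
      have h2 : ((0:Int) + k + 1 + 1).toNat = ((0:Int) + k + 1).toNat + 1 := by omega
      rw [h1, h2, List.take_succ_cons, List.drop_succ_cons, h1]
      simp
    by_cases hc : c = '_'
    · subst hc
      rw [show splitChar ('_' :: t) = [] :: splitChar t from by simp [splitChar]]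
      cases hs : splitChar t with
      | nil => exact absurd hs (splitChar_ne_nil t)
      | cons a l =>
        rw [show aParts ([] :: a :: l) =
          ([] ++ '/' :: PySem.Chars.join ['_'] (a :: l)) ::
            (aParts (a :: l)).map (fun u => [] ++ '_' :: u) from rfl]
        simp only [if_pos (by simp : (((0:Int), '_').2 == '_') = true)]
        rw [List.map_cons, hmaps, ih, hs]
        congr 1
        rw [PySem.List.slice_to _ (by norm_num : (0:Int) ≤ 0),
            PySem.List.slice_from _ (by norm_num : (0:Int) ≤ 0 + 1)]
        have hj : PySem.Chars.join ['_'] (a :: l) = t := by rw [← hs]; exact join_splitChar t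
        simp [hj]
    · rw [show splitChar (c :: t) = (splitChar t).modifyHead (c :: ·) from by simp [splitChar, hc]]
      rw [aParts_modifyHead c _ (splitChar_ne_nil t)]
      rw [if_neg (by simp [hc])]
      rw [hmaps, ih]

-- underscore membership from the `in` test
theorem isIn_underscore_iff (name : String) :
    PySem.Str.isIn "_" name = true ↔ '_' ∈ name.toList := by
  have e : "_".toList = ['_'] := by decide
  rw [PySem.Str.isIn_iff_infix, e]
  constructor
  · intro h
    obtain ⟨pre, suf, hps⟩ := h
    rw [← hps]; simp
  · intro h
    obtain ⟨l1, l2, hl⟩ := List.append_of_mem h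
    exact ⟨l1, l2, by rw [hl]; simp⟩

-- ===== VERDICT (by name: the statement is the Claim_ definition above) =====
theorem generate_underscore_splits_py_spec : Claim_equal_generate_underscore_splits_py := by
  intro name _
  unfold Spec_generate_underscore_splits_py generate_underscore_splits_py generate_underscore_splits_py_alt
  by_cases h : PySem.Str.isIn "_" name = true
  · rw [if_neg (show ¬ PySem.Str.isIn "_" name = false from fun hf => by rw [h] at hf; exact Bool.noConfusion hf)]
    dsimp only
    rw [PySem.List.foldl_append_singleton_eq_map
      (f := fun i => String.ofList
        (PySem.Chars.join ['_'] (PySem.List.slice (PySem.Chars.splitOn name.toList ['_']) none (some i)) ++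
          '/' :: PySem.Chars.join ['_'] (PySem.List.slice (PySem.Chars.splitOn name.toList ['_']) (some i) none)))]
    rw [List.nil_append]
    congr 1
    rw [show (fun i => String.ofList
        (PySem.Chars.join ['_'] (PySem.List.slice (PySem.Chars.splitOn name.toList ['_']) none (some i)) ++
          '/' :: PySem.Chars.join ['_'] (PySem.List.slice (PySem.Chars.splitOn name.toList ['_']) (some i) none)))
      = String.ofList ∘ (fun i =>
        PySem.Chars.join ['_'] (PySem.List.slice (PySem.Chars.splitOn name.toList ['_']) none (some i)) ++
          '/' :: PySem.Chars.join ['_'] (PySem.List.slice (PySem.Chars.splitOn name.toList ['_']) (some i) none)) from rfl]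
    rw [show (fun (ic : Int × Char) => String.ofList (PySem.List.slice name.toList none (some ic.1) ++
        '/' :: PySem.List.slice name.toList (some (ic.1 + 1)) none))
      = String.ofList ∘ (fun (ic : Int × Char) => PySem.List.slice name.toList none (some ic.1) ++
        '/' :: PySem.List.slice name.toList (some (ic.1 + 1)) none) from rfl]
    rw [← List.map_map, ← List.map_map]
    congr 1
    rw [splitOn_eq_splitChar]
    rw [aRange_eq _ (splitChar_ne_nil name.toList)]
    exact (bList_eq name.toList).symm
  · rw [if_pos (by simpa using h)]
    have hnot : '_' ∉ name.toList := fun hm => h ((isIn_underscore_iff name).mpr hm)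
    have hfilt : (PySem.List.enumerate name.toList).filter (fun ic => ic.2 == '_') = [] := by
      rw [List.filter_eq_nil_iff]
      intro p hp
      obtain ⟨k, hk, hpk⟩ := (PySem.List.mem_enumerate_iff _ _ _).mp hp
      subst hpk
      simp only [beq_iff_eq]
      intro hc
      exact hnot (hc ▸ List.getElem_mem hk)
    rw [hfilt]
    simp
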